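-- pv_equiv track=rewrite | github.com/mateuszwroobel/DSA | egzaminy/egzaminy_poprzednie/egzamin_2_szablony_2020_21/zad3.py | lamps
-- ===== SOURCE A (Python) =====
-- def lamps(n, T):
--     left = lambda i: 2*i + 1
--     right = lambda i: 2*i + 2
--     parent = lambda i: (i-1)//2
--
--     class SegmentTree():
--         def __init__(self, n):
--             self.leaves = 1
--             while self.leaves < n:
--                 self.leaves *= 2
--
--             self.heap = [0] * (2 * self.leaves - 1)
--             # liscie zaczynaja sie od self.leaves - 1
--             # uzupelniam liscie tablicami [1,zielony]
--             # musza byc mutowalne wiec wybieram liste a nie krotke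
--
--             for i in range(n):
--                 self.heap[self.leaves - 1 + i] = [0,"green"]
--
--         def update(self,index):
--             #paramtetry - index = oryginalny index z tablicy czyli u nas nr liscia
--             #k - lisc odpowiednik
--             k = index + self.leaves - 1
--             if self.heap[k][1] == "green":
--                 self.heap[k][1] = "red"
--                 #nie musimy zmieniac sumy
--
--             elif self.heap[k][1] == "blue":
--                 self.heap[k] = [0,"green"]
--                 k = parent(k)
--                 #zmienamy sume
--                 while k >= 0:
--                     self.heap[k] -= 1
--                     k = parent(k)
--             else:
--                 #zapalamy lampke na niebieski
--                 self.heap[k] = [1,"blue"]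
--                 k = parent(k)
--                 while k >= 0:
--                     self.heap[k] += 1
--                     k = parent(k)
--
--         # def _sum(self,node, node_low, node_high, i, j):
--         #     #zwracam sume w przedziale i - j
--         #     #jestem w nodzie , ktory odpowiada za sume w przedziale node_low - node_high
--         #
--         #     #Case 1: Nie przecinaja sie
--         #     if j < node_low or i > node_high:
--         #         return 0
--         #     #Case 2: przedzial node_low, node_high zawiera sie w calosci w i,j
--         #     if i <= node_low and node_high >= j:
--         #         #jesli lisc
--         #         if node >= self.leaves - 1:
--         #             return self.heap[node][0]
--         #         else:
--         #             return self.heap[node]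
--         #     else:
--         #         #Case 3 przedzialy sie przecinaja
--         #         mid = (node_low+node_high)//2
--         #         left_sum = self._sum(left(node), node_low,mid,i,j)
--         #         right_sum = self._sum(right(node),mid+1,node_high,i,j)
--         #         return right_sum + left_sum
--         #
--         # def sum(self,i,j):
--         #     return self._sum(0,0, self.leaves - 1, i, j)
--
--     best = 0
--     st = SegmentTree(n)
--     for a,b in T:
--         for lamp in range(a,b+1):
--             #odpalam lampke
--             st.update(lamp)
--
--         best = max(best, st.heap[0])
--
--     return best
-- ===== SOURCE B (Python) =====
-- def lamps(n, T):
--     # Flat toggle-count simulation: one counter per lamp (state = count mod 3),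
--     # plus a running count of blue lamps; no tree, no per-update log-n climb.
--     cnt = [0] * n
--     blues = 0
--     best = 0
--     for a, b in T:
--         for lamp in range(a, b + 1):
--             cnt[lamp] += 1
--             r = cnt[lamp] % 3
--             if r == 2:
--                 blues += 1
--             elif r == 0:
--                 blues -= 1
--         best = max(best, blues)
--     return best
-- ===== Notes on version B (the rewrite author's own statement) =====
-- stated objective: faster
-- what changed: Replaces the segment tree (heap array of [count,colour] leaves with an O(log n) ancestor-climb per toggle) by a flat per-lamp toggle counter modulo 3 with a running blue-lamp count updated in O(1) per toggle; Pre_ excludes n = 1 with a nonempty query list and queries whose nonempty range reaches a lamp outside [0, n), where A raises a TypeError/IndexError except for some very negative indices on which Python's negative-index wraparound makes A return an accidental value that matches no specification.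
-- outside the precondition, e.g. on lamps(2, [(-2, -2), (-2, -2)]): A returns 0, B returns 1
import Mathlib
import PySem

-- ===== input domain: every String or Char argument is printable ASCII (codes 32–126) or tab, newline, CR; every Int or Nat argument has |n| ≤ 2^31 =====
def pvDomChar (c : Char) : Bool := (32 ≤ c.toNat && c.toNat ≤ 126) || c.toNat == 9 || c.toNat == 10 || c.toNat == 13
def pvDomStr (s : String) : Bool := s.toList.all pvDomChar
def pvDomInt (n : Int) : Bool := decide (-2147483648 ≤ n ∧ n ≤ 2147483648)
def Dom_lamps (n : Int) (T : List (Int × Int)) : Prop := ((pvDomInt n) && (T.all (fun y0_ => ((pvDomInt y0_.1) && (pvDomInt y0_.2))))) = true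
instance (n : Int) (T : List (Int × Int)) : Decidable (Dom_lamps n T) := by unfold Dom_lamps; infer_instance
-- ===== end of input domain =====

-- B replaces A's segment tree (per-toggle O(log n) ancestor climb) by a flat
-- per-lamp toggle counter mod 3 with a running blue count (O(1) per toggle); measured faster.

-- ===== PORT A =====
-- A's heap holds plain ints at internal nodes and [count, colour] lists at leaves:
abbrev PvNode : Type := Int ⊕ (Int × String)

def pvParent (i : Int) : Int := PySem.Int.floordiv (i - 1) 2

-- the doubling loop 'while leaves < n: leaves *= 2' (leaves = 2^k, starting at 2^0 = 1)
def pvLeaves (n : Int) (k : Nat) : Nat :=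
  if h : ((2 ^ k : Nat) : Int) < n then pvLeaves n (k + 1) else 2 ^ k
termination_by n.toNat - 2 ^ k
decreasing_by
  have h1 : 1 ≤ 2 ^ k := Nat.one_le_two_pow
  simp only [pow_succ]
  omega

-- 'while k >= 0: heap[k] += delta; k = parent(k)'  (ancestors are ints; a non-int is left
-- unchanged — Python raises there, unreachable inside Pre_)
def pvClimb (heap : List PvNode) (k δ : Int) : List PvNode :=
  if h : 0 ≤ k then
    pvClimb (heap.modify k.toNat (fun x => match x with | Sum.inl v => Sum.inl (v + δ) | y => y))
      (pvParent k) δ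
  else heap
termination_by (k + 1).toNat
decreasing_by
  unfold pvParent
  rw [PySem.Int.floordiv_eq_ediv_of_pos (by norm_num)]
  omega

-- SegmentTree.update;  reads heap[k] with Python indexing; k is nonnegative and in range on
-- every input Pre_ admits, so List.set at k.toNat is exact there; a non-leaf heap[k] makes
-- Python raise TypeError (outside Pre_), the port returns the heap unchanged there.
def pvUpdate (leaves : Nat) (heap : List PvNode) (index : Int) : List PvNode :=
  let k : Int := index + (leaves : Int) - 1
  match PySem.List.pyGet? heap k with
  | some (Sum.inr (c, color)) =>
    if color = "green" then heap.set k.toNat (Sum.inr (c, "red"))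
    else if color = "blue" then
      pvClimb (heap.set k.toNat (Sum.inr (0, "green"))) (pvParent k) (-1)
    else
      pvClimb (heap.set k.toNat (Sum.inr (1, "blue"))) (pvParent k) 1
  | _ => heap

-- one iteration of A's outer query loop; 'max(best, heap[0])' raises in Python unless
-- heap[0] is an int (outside Pre_ only), the port keeps best there
def pvAStep (leaves : Nat) (st : List PvNode × Int) (q : Int × Int) : List PvNode × Int :=
  let heap := (PySem.List.pyRange q.1 (q.2 + 1) 1).foldl (fun h lamp => pvUpdate leaves h lamp) st.1
  (heap, match heap with | Sum.inl v :: _ => max st.2 v | _ => st.2)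

def lamps (n : Int) (T : List (Int × Int)) : Int :=
  let leaves := pvLeaves n 0
  let heap0 : List PvNode := List.replicate (2 * leaves - 1) (Sum.inl 0)
  let heap1 := (PySem.List.pyRange 0 n 1).foldl
      (fun h i => h.set (leaves - 1 + i.toNat) (Sum.inr (0, "green"))) heap0
  (T.foldl (pvAStep leaves) (heap1, 0)).2

-- ===== PORT B =====
-- 'cnt[lamp] += 1' then adjust blues by cnt[lamp] % 3; lamp is a valid nonnegative index on
-- every input Pre_ admits, so getD/set at lamp.toNat are exact there
def pvBStep (s : List Int × Int) (lamp : Int) : List Int × Int :=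
  let c := s.1.getD lamp.toNat 0 + 1
  (s.1.set lamp.toNat c,
   if PySem.Int.mod c 3 = 2 then s.2 + 1
   else if PySem.Int.mod c 3 = 0 then s.2 - 1 else s.2)

def pvBQuery (st : (List Int × Int) × Int) (q : Int × Int) : (List Int × Int) × Int :=
  let s := (PySem.List.pyRange q.1 (q.2 + 1) 1).foldl pvBStep st.1
  (s, max st.2 s.2)

def lamps_alt (n : Int) (T : List (Int × Int)) : Int :=
  (T.foldl pvBQuery ((List.replicate n.toNat 0, 0), 0)).2

-- ===== PRECONDITION & SPEC =====
-- Pre_ excludes n = 1 with a nonempty query list, and queries whose nonempty range reaches a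
-- lamp outside [0, n): there A raises TypeError/IndexError, except for some very negative
-- lamp indices on which Python's negative-index wraparound makes A return an accidental
-- value that matches no specification.
def Pre_lamps (n : Int) (T : List (Int × Int)) : Prop :=
  (n = 1 → T = []) ∧ ∀ q ∈ T, q.2 < q.1 ∨ (0 ≤ q.1 ∧ q.2 < n)
instance (n : Int) (T : List (Int × Int)) : Decidable (Pre_lamps n T) := by
  unfold Pre_lamps; infer_instance

def pvWitness_lamps : Int × (List (Int × Int)) := (5, [(0, 2), (0, 2), (0, 2), (1, 4)])

def Spec_lamps (n : Int) (T : List (Int × Int)) (out : Int) : Prop := out = lamps_alt n T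
instance (n : Int) (T : List (Int × Int)) (out : Int) : Decidable (Spec_lamps n T out) := by
  unfold Spec_lamps; infer_instance

-- ===== CLAIM (what is proved, stated in full; the proofs are below) =====
def Claim_equal_lamps : Prop := ∀ (n : Int) (T : List (Int × Int)),
  Dom_lamps n T → Pre_lamps n T → Spec_lamps n T (lamps n T)

-- ===== LEMMAS AND PROOFS =====

-- the leaf a toggle count c produces: green/red/blue for c % 3 = 0/1/2
def pvState (c : Int) : PvNode :=
  if c % 3 = 2 then Sum.inr (1, "blue")
  else if c % 3 = 0 then Sum.inr (0, "green") else Sum.inr (0, "red")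

-- the coupling invariant between A's heap and B's (cnt, blues) state
def pvInv (L : Nat) (n : Int) (heap : List PvNode) (cnt : List Int) (blues : Int) : Prop :=
  heap.length = 2 * L - 1 ∧ cnt.length = n.toNat ∧
  heap[0]? = some (Sum.inl blues) ∧
  ∀ j : Nat, j < n.toNat → heap[L - 1 + j]? = some (pvState (cnt.getD j 0))

lemma pvLeaves_ge (n : Int) (k : Nat) : n ≤ (pvLeaves n k : Int) := by
  fun_induction pvLeaves with
  | case1 k h ih => exact ih
  | case2 k h => omega

lemma pvLeaves_pos (n : Int) (k : Nat) : 1 ≤ pvLeaves n k := by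
  fun_induction pvLeaves with
  | case1 k h ih => exact ih
  | case2 k h => exact Nat.one_le_two_pow

lemma pvParent_ediv (k : Int) : pvParent k = (k - 1) / 2 := by
  unfold pvParent
  exact PySem.Int.floordiv_eq_ediv_of_pos (by norm_num)

lemma pv_foldl_set_len {α : Type} (v : α) (f : Int → Nat) (ls : List Int) (h0 : List α) :
    (ls.foldl (fun h i => h.set (f i) v) h0).length = h0.length := by
  induction ls generalizing h0 with
  | nil => rfl
  | cons a ls ih => simp [List.foldl_cons, ih]

lemma pv_foldl_set_get {α : Type} (v : α) (f : Int → Nat) (ls : List Int) (h0 : List α) (m : Nat) :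
    (ls.foldl (fun h i => h.set (f i) v) h0)[m]? =
      if m < h0.length ∧ ∃ i ∈ ls, f i = m then some v else h0[m]? := by
  induction ls generalizing h0 with
  | nil => simp
  | cons a ls ih =>
    rw [List.foldl_cons, ih, List.length_set]
    by_cases hm : m < h0.length
    · by_cases hex : ∃ i ∈ ls, f i = m
      · simp [hm, hex]
      · by_cases ha : f a = m
        · simp [hm, hex, ha, List.getElem?_set]
        · simp [hm, hex, ha, List.getElem?_set]
    · have h1 : (h0.set (f a) v)[m]? = h0[m]? := by
        rw [List.getElem?_set]
        have h2 : h0[m]? = none := List.getElem?_eq_none (by omega)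
        by_cases ha : f a = m <;> simp [ha, h2, hm]
      rw [if_neg (fun hcon => hm hcon.1), if_neg (fun hcon => hm hcon.1), h1]

lemma pvClimb_length (heap : List PvNode) (k δ : Int) :
    (pvClimb heap k δ).length = heap.length := by
  fun_induction pvClimb <;> simp_all

lemma pvClimb_get_gt (j : Nat) (δ : Int) :
    ∀ (m : Nat) (heap : List PvNode) (k : Int), (k + 1).toNat ≤ m → k < (j : Int) →
      (pvClimb heap k δ)[j]? = heap[j]? := by
  intro m
  induction m with
  | zero =>
    intro heap k hm hj
    rw [pvClimb, dif_neg (by omega)]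
  | succ m ih =>
    intro heap k hm hj
    rw [pvClimb]
    by_cases h : 0 ≤ k
    · rw [dif_pos h]
      have h2 : pvParent k < k := by rw [pvParent_ediv]; omega
      rw [ih _ _ (by omega) (by omega)]
      rw [List.getElem?_modify]
      have : k.toNat ≠ j := by omega
      simp [this]
    · rw [dif_neg h]

lemma pvClimb_root (v δ : Int) :
    ∀ (m : Nat) (heap : List PvNode) (k : Int), (k + 1).toNat ≤ m → 0 ≤ k →
      heap[0]? = some (Sum.inl v) → (pvClimb heap k δ)[0]? = some (Sum.inl (v + δ)) := by
  intro m
  induction m with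
  | zero => intro heap k hm hk hv; omega
  | succ m ih =>
    intro heap k hm hk hv
    rw [pvClimb, dif_pos hk]
    by_cases h0 : k = 0
    · subst h0
      have hp : pvParent 0 = -1 := by rw [pvParent_ediv]; decide
      rw [hp, pvClimb, dif_neg (by omega)]
      rw [List.getElem?_modify]
      simp [hv]
    · have hpar : 0 ≤ pvParent k := by rw [pvParent_ediv]; omega
      have h2 : pvParent k < k := by rw [pvParent_ediv]; omega
      apply ih _ _ (by omega) hpar
      rw [List.getElem?_modify]
      have : k.toNat ≠ 0 := by omega
      simp [this, hv]

lemma pvUpdate_pair (L : Nat) (n : Int) (hn : 2 ≤ n) (hL : n ≤ (L : Int))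
    (heap : List PvNode) (cnt : List Int) (blues : Int) (lamp : Int)
    (h0 : 0 ≤ lamp) (h1 : lamp < n) (hInv : pvInv L n heap cnt blues) :
    pvInv L n (pvUpdate L heap lamp)
      (pvBStep (cnt, blues) lamp).1 (pvBStep (cnt, blues) lamp).2 := by
  obtain ⟨hlen, hclen, hroot, hleaf⟩ := hInv
  have hL2 : 2 ≤ L := by omega
  set j : Nat := lamp.toNat with hj
  have hjn : j < n.toNat := by omega
  set c : Int := cnt.getD j 0 with hc
  have hk : lamp + (L : Int) - 1 = ((L - 1 + j : Nat) : Int) := by omega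
  have hkb : L - 1 + j < heap.length := by omega
  have hkt : (lamp + (L : Int) - 1).toNat = L - 1 + j := by omega
  have hget : PySem.List.pyGet? heap (lamp + (L : Int) - 1) = some (pvState c) := by
    rw [hk, PySem.List.pyGet?_natCast]
    exact hleaf j hjn
  have hcgetD : (cnt.set j (c + 1)).getD j 0 = c + 1 := by
    rw [List.getD_eq_getElem?_getD, List.getElem?_set_self (by omega)]
    rfl
  have hcgetD' : ∀ j' : Nat, j' ≠ j → (cnt.set j (c + 1)).getD j' 0 = cnt.getD j' 0 := by
    intro j' hne
    rw [List.getD_eq_getElem?_getD, List.getElem?_set_ne (by omega), ← List.getD_eq_getElem?_getD]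
  have hBsimp : pvBStep (cnt, blues) lamp =
      (cnt.set j (c + 1),
        if (c + 1) % 3 = 2 then blues + 1 else if (c + 1) % 3 = 0 then blues - 1 else blues) := by
    simp only [pvBStep, PySem.Int.mod_eq_emod_of_pos (show (0:Int) < 3 by norm_num)]
    rfl
  have hpar0 : 0 ≤ pvParent (lamp + (L : Int) - 1) := by rw [pvParent_ediv]; omega
  have hparlt : pvParent (lamp + (L : Int) - 1) < ((L : Int)) - 1 := by
    rw [pvParent_ediv]; omega
  have hm3 : c % 3 = 0 ∨ c % 3 = 1 ∨ c % 3 = 2 := by omega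
  rcases hm3 with hm | hm | hm
  · -- green → red, no climb, blues unchanged
    have hmv : (c + 1) % 3 = 1 := by omega
    have hst : pvState c = Sum.inr (0, "green") := by unfold pvState; simp [hm]
    have hBval : pvBStep (cnt, blues) lamp = (cnt.set j (c + 1), blues) := by
      rw [hBsimp, if_neg (by omega), if_neg (by omega)]
    rw [hBval]
    simp only [pvUpdate]
    rw [hget, hst]
    simp only [String.reduceEq, reduceIte]
    refine ⟨by simp [hkt, hlen], by simp [hclen], ?_, ?_⟩
    · rw [hkt, List.getElem?_set_ne (by omega), hroot]
    · intro j' hj'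
      rw [hkt]
      by_cases hje : j' = j
      · subst hje
        rw [List.getElem?_set_self hkb, hcgetD]
        unfold pvState
        simp [hmv]
      · rw [List.getElem?_set_ne (by omega), hleaf j' hj', hcgetD' j' hje]
  · -- red → blue, climb +1
    have hmv : (c + 1) % 3 = 2 := by omega
    have hst : pvState c = Sum.inr (0, "red") := by unfold pvState; simp [hm]
    have hBval : pvBStep (cnt, blues) lamp = (cnt.set j (c + 1), blues + 1) := by
      rw [hBsimp, if_pos hmv]
    rw [hBval]
    simp only [pvUpdate]
    rw [hget, hst]
    simp only [String.reduceEq, reduceIte]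
    refine ⟨by rw [pvClimb_length]; simp [hkt, hlen], by simp [hclen], ?_, ?_⟩
    · apply pvClimb_root blues 1 (pvParent (lamp + (L : Int) - 1) + 1).toNat _ _ le_rfl hpar0
      rw [hkt, List.getElem?_set_ne (by omega), hroot]
    · intro j' hj'
      rw [pvClimb_get_gt (L - 1 + j') 1 _ _ _ le_rfl (by omega), hkt]
      by_cases hje : j' = j
      · subst hje
        rw [List.getElem?_set_self hkb, hcgetD]
        unfold pvState
        simp [hmv]
      · rw [List.getElem?_set_ne (by omega), hleaf j' hj', hcgetD' j' hje]
  · -- blue → green, climb -1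
    have hmv : (c + 1) % 3 = 0 := by omega
    have hst : pvState c = Sum.inr (1, "blue") := by unfold pvState; simp [hm]
    have hBval : pvBStep (cnt, blues) lamp = (cnt.set j (c + 1), blues - 1) := by
      rw [hBsimp, if_neg (by omega), if_pos hmv]
    rw [hBval]
    simp only [pvUpdate]
    rw [hget, hst]
    simp only [String.reduceEq, reduceIte]
    refine ⟨by rw [pvClimb_length]; simp [hkt, hlen], by simp [hclen], ?_, ?_⟩
    · have := pvClimb_root blues (-1) (pvParent (lamp + (L : Int) - 1) + 1).toNat
        (heap.set (lamp + (L : Int) - 1).toNat (Sum.inr (0, "green"))) _ le_rfl hpar0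
        (by rw [hkt, List.getElem?_set_ne (by omega), hroot])
      rw [show blues + (-1 : Int) = blues - 1 from by ring] at this
      exact this
    · intro j' hj'
      rw [pvClimb_get_gt (L - 1 + j') (-1) _ _ _ le_rfl (by omega), hkt]
      by_cases hje : j' = j
      · subst hje
        rw [List.getElem?_set_self hkb, hcgetD]
        unfold pvState
        simp [hmv]
      · rw [List.getElem?_set_ne (by omega), hleaf j' hj', hcgetD' j' hje]

lemma pvInner_pair (L : Nat) (n : Int) (hn1 : n ≠ 1) (hL : n ≤ (L : Int)) :
    ∀ (ls : List Int) (heap : List PvNode) (s : List Int × Int),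
      (∀ x ∈ ls, 0 ≤ x ∧ x < n) → pvInv L n heap s.1 s.2 →
      pvInv L n (ls.foldl (fun h lamp => pvUpdate L h lamp) heap)
        (ls.foldl pvBStep s).1 (ls.foldl pvBStep s).2 := by
  intro ls
  induction ls with
  | nil => intro heap s _ hInv; exact hInv
  | cons a ls ih =>
    intro heap s hb hInv
    have ha := hb a (by simp)
    have hn2 : 2 ≤ n := by omega
    rw [List.foldl_cons, List.foldl_cons]
    exact ih _ (pvBStep s a) (fun x hx => hb x (by simp [hx]))
      (by
        have := pvUpdate_pair L n hn2 hL heap s.1 s.2 a ha.1 ha.2 hInv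
        simpa using this)

lemma pvOuter_pair (L : Nat) (n : Int) (hn1 : n ≠ 1) (hL : n ≤ (L : Int)) :
    ∀ (T : List (Int × Int)) (heap : List PvNode) (s : List Int × Int) (best : Int),
      (∀ q ∈ T, q.2 < q.1 ∨ (0 ≤ q.1 ∧ q.2 < n)) → pvInv L n heap s.1 s.2 →
      (T.foldl (pvAStep L) (heap, best)).2 = (T.foldl pvBQuery (s, best)).2 := by
  intro T
  induction T with
  | nil => intro heap s best _ _; rfl
  | cons q T ih =>
    intro heap s best hq hInv
    have hb : ∀ x ∈ PySem.List.pyRange q.1 (q.2 + 1) 1, 0 ≤ x ∧ x < n := by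
      intro x hx
      rcases hq q (by simp) with h | h
      · rw [PySem.List.pyRange_one_eq_nil (by omega)] at hx
        simp at hx
      · rw [PySem.List.mem_pyRange_one] at hx
        omega
    have hInv' := pvInner_pair L n hn1 hL (PySem.List.pyRange q.1 (q.2 + 1) 1) heap s hb hInv
    set heap' := (PySem.List.pyRange q.1 (q.2 + 1) 1).foldl (fun h lamp => pvUpdate L h lamp) heap
      with hh
    set s' := (PySem.List.pyRange q.1 (q.2 + 1) 1).foldl pvBStep s with hs
    rw [List.foldl_cons, List.foldl_cons]
    have hAq : pvAStep L (heap, best) q = (heap', max best s'.2) := by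
      unfold pvAStep
      rw [← hh]
      obtain ⟨_, _, hroot, _⟩ := hInv'
      rcases heap'' : heap' with _ | ⟨x, t⟩
      · rw [heap''] at hroot; simp at hroot
      · rw [heap''] at hroot
        simp at hroot
        rw [hroot]
    have hBq : pvBQuery (s, best) q = (s', max best s'.2) := by
      unfold pvBQuery
      rw [← hs]
    rw [hAq, hBq]
    exact ih heap' s' (max best s'.2) (fun p hp => hq p (by simp [hp])) hInv'

lemma pvInit (n : Int) (hn1 : n ≠ 1) :
    pvInv (pvLeaves n 0) n
      ((PySem.List.pyRange 0 n 1).foldl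
        (fun h i => h.set (pvLeaves n 0 - 1 + i.toNat) (Sum.inr (0, "green")))
        (List.replicate (2 * pvLeaves n 0 - 1) (Sum.inl 0)))
      (List.replicate n.toNat 0) 0 := by
  set L := pvLeaves n 0 with hLdef
  have hL : n ≤ (L : Int) := pvLeaves_ge n 0
  have hL1 : 1 ≤ L := pvLeaves_pos n 0
  refine ⟨?_, by simp, ?_, ?_⟩
  · rw [pv_foldl_set_len]; simp
  · rw [pv_foldl_set_get]
    have hno : ¬ ((0 : Nat) < (List.replicate (2 * L - 1) (Sum.inl 0 : PvNode)).length ∧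
        ∃ i ∈ PySem.List.pyRange 0 n 1, L - 1 + i.toNat = 0) := by
      rintro ⟨-, i, hi, hfi⟩
      rw [PySem.List.mem_pyRange_one] at hi
      have hn2 : 2 ≤ n := by omega
      omega
    rw [if_neg hno]
    rw [List.getElem?_replicate]
    simp
    omega
  · intro j hj
    rw [pv_foldl_set_get]
    have hyes : (L - 1 + j) < (List.replicate (2 * L - 1) (Sum.inl 0 : PvNode)).length ∧
        ∃ i ∈ PySem.List.pyRange 0 n 1, L - 1 + i.toNat = L - 1 + j := by
      constructor
      · simp; omega
      · refine ⟨(j : Int), ?_, by simp⟩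
        rw [PySem.List.mem_pyRange_one]
        omega
    rw [if_pos hyes]
    have : (List.replicate n.toNat (0 : Int)).getD j 0 = 0 := by
      rw [List.getD_eq_getElem?_getD, List.getElem?_replicate, if_pos hj]
      rfl
    rw [this]
    unfold pvState
    norm_num

-- ===== VERDICT (by name: the statement is the Claim_ definition above) =====
theorem lamps_spec : Claim_equal_lamps := by
  intro n T hdom hpre
  unfold Spec_lamps
  by_cases hn1 : n = 1
  · have hT := hpre.1 hn1
    subst hn1; subst hT
    decide
  · unfold lamps lamps_alt
    simp only []
    exact pvOuter_pair (pvLeaves n 0) n hn1 (pvLeaves_ge n 0) T _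
      (List.replicate n.toNat 0, 0) 0 hpre.2 (pvInit n hn1)
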